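-- pv_equiv track=rewrite | github.com/BitTrace-AI/bittrace_api_v3_source | src/bittrace/v3/frontend_encoding.py | _select_single_medoid
-- ===== SOURCE A (Python) =====
-- from collections.abc import Mapping, Sequence
--
-- def _bit_distance(left: int, right: int) -> int:
--     return (left ^ right).bit_count()
--
-- def _select_single_medoid(rows: Sequence[int]) -> int:
--     return min(
--         rows,
--         key=lambda row: (
--             sum(_bit_distance(row, other) for other in rows),
--             row,
--         ),
--     )
-- ===== SOURCE B (Python) =====
-- def _select_single_medoid(rows):
--     # Builds the per-row total-distance vector back-to-front over suffixes,
--     # computing each unordered pair's distance ONCE (symmetry: d(x,y)=d(y,x),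
--     # d(x,x)=0), then scan once for the lexicographically least (cost, row).
--     costs = []
--     for i in range(len(rows) - 1, -1, -1):
--         x = rows[i]
--         ds = [(x ^ y).bit_count() for y in rows[i + 1:]]
--         costs = [sum(ds)] + [c + d for c, d in zip(costs, ds)]
--     best_c, best_r = costs[0], rows[0]
--     for c, r in zip(costs[1:], rows[1:]):
--         if c < best_c or (c == best_c and r < best_r):
--             best_c, best_r = c, r
--     return best_r
-- ===== Notes on version B (the rewrite author's own statement) =====
-- stated objective: alternative
-- what changed: B exploits symmetry d(x,y)=d(y,x) and d(x,x)=0 to compute each unordered pair's Hamming distance once, building the per-row cost vector back-to-front over suffixes, then does one explicit argmin scan on (cost,row), instead of A's min-with-key that recomputes every row's full distance sum independently.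
-- outside the precondition, e.g. on _select_single_medoid([]): A raises ValueError, B raises IndexError
import Mathlib
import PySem

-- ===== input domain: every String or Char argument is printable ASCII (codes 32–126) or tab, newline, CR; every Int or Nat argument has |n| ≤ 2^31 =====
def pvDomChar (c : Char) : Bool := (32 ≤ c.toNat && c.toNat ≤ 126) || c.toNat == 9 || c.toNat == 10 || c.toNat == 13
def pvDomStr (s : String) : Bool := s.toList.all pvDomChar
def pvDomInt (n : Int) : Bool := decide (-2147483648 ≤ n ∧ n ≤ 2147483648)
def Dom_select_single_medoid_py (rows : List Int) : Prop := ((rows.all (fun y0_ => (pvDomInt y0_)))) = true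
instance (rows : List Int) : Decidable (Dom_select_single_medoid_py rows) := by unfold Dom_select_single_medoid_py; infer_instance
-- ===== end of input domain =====

-- B computes each unordered pair's distance once (symmetry d(x,y)=d(y,x), d(x,x)=0),
-- building the cost vector back-to-front over suffixes, then scans once for the argmin,
-- instead of A's min-with-key recomputing every row's full distance sum (same O(n^2)).

-- ===== PORT A =====
def bit_distance_py (left right : Int) : Int :=
  (PySem.Int.bitCount (PySem.Int.bxor left right) : Int)

-- min(rows, key=lambda row: (sum(...), row)) : tuple key -> PySem.List.min2?;
-- sum over a generator is the obvious foldl.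
def select_single_medoid_py (rows : List Int) : Int :=
  (PySem.List.min2? rows
    (fun row => rows.foldl (fun s other => s + bit_distance_py row other) 0)
    (fun row => row)).getD 0

-- ===== PORT B =====
-- Source B's back-to-front loop over suffixes (costs for rows[i:] from costs for rows[i+1:])
-- is ported as structural recursion on the list: one step = one loop iteration.
def costsB : List Int → List Int
  | [] => []
  | x :: rest =>
    let ds := rest.map (fun y => (PySem.Int.bitCount (PySem.Int.bxor x y) : Int))
    let sub := costsB rest
    (ds.foldl (fun s d => s + d) 0) :: List.zipWith (fun c d => c + d) sub ds

def select_single_medoid_py_alt (rows : List Int) : Int :=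
  match rows with
  | [] => 0
  | r0 :: rtail =>
    match costsB (r0 :: rtail) with
    | [] => 0
    | c0 :: ctail =>
      ((List.zip ctail rtail).foldl
        (fun b p => if p.1 < b.1 ∨ (p.1 = b.1 ∧ p.2 < b.2) then p else b)
        (c0, r0)).2

-- ===== PRECONDITION & SPEC =====
-- A raises ValueError on the empty list (min of empty sequence); B raises IndexError there.
def Pre_select_single_medoid_py (rows : List Int) : Prop := rows ≠ []
instance (rows : List Int) : Decidable (Pre_select_single_medoid_py rows) := by
  unfold Pre_select_single_medoid_py; infer_instance

def pvWitness_select_single_medoid_py : List Int := [3, -5, 3, 12]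

def Spec_select_single_medoid_py (rows : List Int) (out : Int) : Prop := out = select_single_medoid_py_alt rows
instance (rows : List Int) (out : Int) : Decidable (Spec_select_single_medoid_py rows out) := by unfold Spec_select_single_medoid_py; infer_instance

-- ===== CLAIM (what is proved, stated in full; the proofs are below) =====
def Claim_equal_select_single_medoid_py : Prop := ∀ (rows : List Int), Dom_select_single_medoid_py rows → Pre_select_single_medoid_py rows → Spec_select_single_medoid_py rows (select_single_medoid_py rows)

-- ===== LEMMAS AND PROOFS =====

-- the pair distance, and A's per-row total cost
def bd (x y : Int) : Int := (PySem.Int.bitCount (PySem.Int.bxor x y) : Int)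

theorem bd_comm (x y : Int) : bd x y = bd y x := by
  unfold bd; rw [PySem.Int.bxor_comm]

theorem bd_self (x : Int) : bd x x = 0 := by
  unfold bd; simp [PySem.Int.bxor_self]

theorem foldl_add_sum (f : Int → Int) (l : List Int) (s : Int) :
    l.foldl (fun a o => a + f o) s = s + (l.map f).sum := by
  induction l generalizing s with
  | nil => simp
  | cons h t ih => simp [List.foldl_cons, ih, add_assoc]

theorem zipWith_map_same {α β γ δ : Type} (f : β → γ → δ) (g : α → β) (h : α → γ)
    (l : List α) : List.zipWith f (l.map g) (l.map h) = l.map (fun a => f (g a) (h a)) := by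
  induction l with
  | nil => rfl
  | cons x t ih => simp [List.map_cons, List.zipWith_cons_cons, ih]

theorem zip_map_left {α β : Type} (g : α → β) (l : List α) :
    List.zip (l.map g) l = l.map (fun a => (g a, a)) := by
  induction l with
  | nil => rfl
  | cons x t ih => simp [List.map_cons, ih]

-- costsB computes exactly A's per-row totals
theorem costsB_eq (l : List Int) :
    costsB l = l.map (fun x => ((l.map (bd x)).sum)) := by
  induction l with
  | nil => rfl
  | cons x t ih =>
    show ((t.map (bd x)).foldl (fun s d => s + d) 0)
        :: List.zipWith (fun c d => c + d) (costsB t) (t.map (bd x)) = _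
    rw [ih, zipWith_map_same]
    have hhead : ((t.map (bd x)).foldl (fun s d => s + d) 0) = ((x :: t).map (bd x)).sum := by
      have := foldl_add_sum (fun d => d) (t.map (bd x)) 0
      simp only [List.map_id_fun', id] at this
      simp [this, List.map_cons, List.sum_cons, bd_self]
    rw [hhead, List.map_cons]
    congr 1
    apply List.map_congr_left
    intro y _
    simp only [List.map_cons, List.sum_cons, bd_comm x y]
    exact add_comm _ _

-- the common selection loop: running lexicographic (key, value) minimum
def min2run (k : Int → Int) (m : Int) : List Int → Int
  | [] => m
  | x :: t => if k x < k m ∨ (k x = k m ∧ x < m) then min2run k x t else min2run k m t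

-- A's min2? with identity second key is min2run
theorem min2?_run (k : Int → Int) (t : List Int) : ∀ (m : Int),
    PySem.List.min2? (m :: t) k (fun row => row) = some (min2run k m t) := by
  induction t with
  | nil => intro m; rfl
  | cons x t ih =>
    intro m
    by_cases h : k x < k m ∨ (k x = k m ∧ x < m)
    · have hb : (decide (k x < k m) || !decide (k m < k x) && decide (x < m)) = true := by
        simp only [Bool.or_eq_true, Bool.and_eq_true, Bool.not_eq_true', decide_eq_true_eq,
          decide_eq_false_iff_not]
        omega
      have hl : PySem.List.min2? (m :: x :: t) k (fun row => row)
          = PySem.List.min2? (x :: t) k (fun row => row) := by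
        simp only [PySem.List.min2?, List.foldl_cons, hb]
        rfl
      rw [hl, ih x, min2run, if_pos h]
    · have hb : (decide (k x < k m) || !decide (k m < k x) && decide (x < m)) = false := by
        simp only [Bool.or_eq_false_iff, Bool.and_eq_false_iff, Bool.not_eq_false',
          decide_eq_false_iff_not, decide_eq_true_eq]
        omega
      have hl : PySem.List.min2? (m :: x :: t) k (fun row => row)
          = PySem.List.min2? (m :: t) k (fun row => row) := by
        simp only [PySem.List.min2?, List.foldl_cons, hb]
        rfl
      rw [hl, ih m, min2run, if_neg h]

-- B's pair-fold is min2run as well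
theorem pairfold_run (g : Int → Int) (l : List Int) : ∀ (m : Int),
    (l.map (fun r => (g r, r))).foldl
        (fun b p => if p.1 < b.1 ∨ (p.1 = b.1 ∧ p.2 < b.2) then p else b) (g m, m)
      = (g (min2run g m l), min2run g m l) := by
  induction l with
  | nil => intro m; rfl
  | cons x t ih =>
    intro m
    simp only [List.map_cons, List.foldl_cons]
    by_cases h : g x < g m ∨ (g x = g m ∧ x < m)
    · rw [if_pos h, min2run, if_pos h]; exact ih x
    · rw [if_neg h, min2run, if_neg h]; exact ih m

-- ===== VERDICT (by name: the statement is the Claim_ definition above) =====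
theorem select_single_medoid_py_spec : Claim_equal_select_single_medoid_py := by
  intro rows _ hpre
  unfold Spec_select_single_medoid_py
  match rows, hpre with
  | r0 :: rtail, _ =>
    set g : Int → Int := fun x => (((r0 :: rtail).map (bd x)).sum) with hg
    have hk : (fun row => (r0 :: rtail).foldl (fun s other => s + bit_distance_py row other) 0) = g := by
      funext row
      have := foldl_add_sum (fun other => bd row other) (r0 :: rtail) 0
      simpa [bit_distance_py, bd, hg] using this
    have hA : select_single_medoid_py (r0 :: rtail) = min2run g r0 rtail := by
      unfold select_single_medoid_py
      rw [hk, min2?_run]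
      rfl
    have hc : costsB (r0 :: rtail) = g r0 :: rtail.map g := by
      rw [costsB_eq]; simp [hg]
    have hB : select_single_medoid_py_alt (r0 :: rtail) = min2run g r0 rtail := by
      simp only [select_single_medoid_py_alt, hc, zip_map_left, pairfold_run]
    rw [hA, hB]
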